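-- pv_equiv track=rewrite | github.com/albertorueda/SchedulerAgent | v1.0/utils.py | no_disponibilidad
-- ===== SOURCE A (Python) =====
-- calendarios = [
--     {"persona": 0, "eventos": [0, 1]},
--     {"persona": 1, "eventos": [2]},
--     {"persona": 2, "eventos": [2, 3]},
-- ]
--
-- eventos = [
--     {"id": 0, "titulo": "Conferencia en línea", "fecha": "2025-03-01", "hora": "17:00", "lugar": "Microsoft Teams", "duracion": "1:30"},
--     {"id": 1, "titulo": "Capacitación interna", "fecha": "2025-02-20", "hora": "09:00", "lugar": "Sala de reuniones 2", "duracion": "2:00"},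
--     {"id": 2, "titulo": "Llamada con cliente", "fecha": "2025-02-16", "hora": "15:00", "lugar": "Microsoft Teams", "duracion": "0:45"},
--     {"id": 3, "titulo": "Reunión de equipo", "fecha": "2025-02-15", "hora": "10:00", "lugar": "Sala de conferencias 3", "duracion": "1:00"},
-- ]
--
-- def convertir_a_minutos(hora: str) -> int:
--     """Convierte una hora en formato 'HH:MM' a minutos."""
--     horas, minutos = map(int, hora.split(':'))
--     return horas * 60 + minutos
--
-- def convertir_a_horas(minutos: int) -> str:
--     """Convierte minutos a una hora en formato 'HH:MM'."""
--     horas = minutos // 60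
--     minutos = minutos % 60
--     return f"{horas:02d}:{minutos:02d}"
--
-- def no_disponibilidad(personas_list):
--     """
--     Devuelve los periodos de tiempo en los que las personas especificadas no están disponibles.
--     Retorna una lista de diccionarios con 'fecha', 'hora_inicio' y 'hora_fin'.
--     """
--     if not personas_list:
--         return None
--     # Obtener todos los IDs de eventos asociados a las personas indicadas
--     event_ids = {
--         evento_id
--         for calendario in calendarios
--         if calendario["persona"] in personas_list
--         for evento_id in calendario["eventos"]
--     }
--     no_disp = []
--     for e in eventos:
--         if e["id"] in event_ids:
--             inicio = e["hora"]
--             fin = convertir_a_horas(convertir_a_minutos(e["hora"]) + convertir_a_minutos(e["duracion"]))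
--             no_disp.append({"fecha": e["fecha"], "hora_inicio": inicio, "hora_fin": fin})
--     return no_disp
-- ===== SOURCE B (Python) =====
-- calendarios = [
--     {"persona": 0, "eventos": [0, 1]},
--     {"persona": 1, "eventos": [2]},
--     {"persona": 2, "eventos": [2, 3]},
-- ]
--
-- eventos = [
--     {"id": 0, "titulo": "Conferencia en línea", "fecha": "2025-03-01", "hora": "17:00", "lugar": "Microsoft Teams", "duracion": "1:30"},
--     {"id": 1, "titulo": "Capacitación interna", "fecha": "2025-02-20", "hora": "09:00", "lugar": "Sala de reuniones 2", "duracion": "2:00"},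
--     {"id": 2, "titulo": "Llamada con cliente", "fecha": "2025-02-16", "hora": "15:00", "lugar": "Microsoft Teams", "duracion": "0:45"},
--     {"id": 3, "titulo": "Reunión de equipo", "fecha": "2025-02-15", "hora": "10:00", "lugar": "Sala de conferencias 3", "duracion": "1:00"},
-- ]
--
-- def no_disponibilidad(personas_list):
--     """Periods where the given people are busy; None if no people given."""
--     if not personas_list:
--         return None
--     no_disp = []
--     for e in eventos:
--         # inline re-scan of the calendars instead of a precomputed id set
--         if any(e["id"] in c["eventos"] for c in calendarios if c["persona"] in personas_list):
--             h, m = map(int, e["hora"].split(":"))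
--             dh, dm = map(int, e["duracion"].split(":"))
--             total = h * 60 + m + dh * 60 + dm
--             no_disp.append({
--                 "fecha": e["fecha"],
--                 "hora_inicio": e["hora"],
--                 "hora_fin": f"{total // 60:02d}:{total % 60:02d}",
--             })
--     return no_disp
-- ===== Notes on version B (the rewrite author's own statement) =====
-- stated objective: simpler
-- what changed: B drops A's precomputed set of event ids and instead, per event, scans the calendars inline with any(); it also inlines the minute/format arithmetic instead of A's two conversion helpers.
import Mathlib
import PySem

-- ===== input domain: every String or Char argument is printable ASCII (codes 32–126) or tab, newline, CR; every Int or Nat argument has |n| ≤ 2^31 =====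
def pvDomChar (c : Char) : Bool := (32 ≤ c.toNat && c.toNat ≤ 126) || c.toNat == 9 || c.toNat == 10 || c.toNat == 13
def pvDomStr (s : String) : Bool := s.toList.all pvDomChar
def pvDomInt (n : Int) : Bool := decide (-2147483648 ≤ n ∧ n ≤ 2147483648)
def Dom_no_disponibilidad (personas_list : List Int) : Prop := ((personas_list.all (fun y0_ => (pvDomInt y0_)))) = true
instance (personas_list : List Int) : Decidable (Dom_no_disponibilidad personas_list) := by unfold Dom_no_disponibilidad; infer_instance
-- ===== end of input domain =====

-- B replaces A's precomputed event-id set with an inline any-scan of the calendars per event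
-- and inlines the time arithmetic; objective: simpler (no index structure), same results.

-- module constants (persona, eventos) and (id, titulo, fecha, hora, lugar, duracion)
def pvCalendarios : List (Int × List Int) :=
  [(0, [0, 1]), (1, [2]), (2, [2, 3])]

def pvEventos : List (Int × String × String × String × String × String) :=
  [(0, "Conferencia en línea", "2025-03-01", "17:00", "Microsoft Teams", "1:30"),
   (1, "Capacitación interna", "2025-02-20", "09:00", "Sala de reuniones 2", "2:00"),
   (2, "Llamada con cliente", "2025-02-16", "15:00", "Microsoft Teams", "0:45"),
   (3, "Reunión de equipo", "2025-02-15", "10:00", "Sala de conferencias 3", "1:00")]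

-- f"{n:02d}" — exact for 0 ≤ n (the only values it receives here)
def pvFmt2 (n : Int) : String :=
  let s := PySem.Int.toStr n
  if PySem.Str.len s < 2 then PySem.Str.join "" ["0", s] else s

-- ===== PORT A =====
-- 'horas, minutos = map(int, hora.split(":"))' — exact where the split yields two int-parsable
-- parts (true of every 'HH:MM' constant this module feeds it); the catch-all arm is unreachable.
def convertir_a_minutos (hora : String) : Int :=
  match PySem.Str.split? hora ":" with
  | some [hs, ms] =>
    match PySem.Int.ofStr? hs, PySem.Int.ofStr? ms with
    | some h, some m => h * 60 + m
    | _, _ => 0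
  | _ => 0

def convertir_a_horas (minutos : Int) : String :=
  let horas := PySem.Int.floordiv minutos 60
  let m := PySem.Int.mod minutos 60
  PySem.Str.join ":" [pvFmt2 horas, pvFmt2 m]

def no_disponibilidad (personas_list : List Int) : Option (List (List (String × String))) :=
  if personas_list = [] then none
  else
    let event_ids : PySem.Set Int :=
      pvCalendarios.foldl
        (fun s c => if personas_list.contains c.1 then c.2.foldl PySem.Set.add s else s)
        PySem.Set.empty
    some (pvEventos.foldl
      (fun acc e =>
        if event_ids.contains e.1 then
          let inicio := e.2.2.2.1
          let fin := convertir_a_horas (convertir_a_minutos inicio + convertir_a_minutos e.2.2.2.2.2)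
          acc ++ [[("fecha", e.2.2.1), ("hora_inicio", inicio), ("hora_fin", fin)]]
        else acc)
      [])

-- ===== PORT B =====
-- 'h, m = map(int, s.split(":"))' as a pair — same exactness note as convertir_a_minutos
def pvHM (s : String) : Int × Int :=
  match PySem.Str.split? s ":" with
  | some [hs, ms] =>
    match PySem.Int.ofStr? hs, PySem.Int.ofStr? ms with
    | some h, some m => (h, m)
    | _, _ => (0, 0)
  | _ => (0, 0)

def no_disponibilidad_alt (personas_list : List Int) : Option (List (List (String × String))) :=
  if personas_list = [] then none
  else
    some (pvEventos.foldl
      (fun acc e =>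
        if pvCalendarios.any (fun c => personas_list.contains c.1 && c.2.contains e.1) then
          let hm := pvHM e.2.2.2.1
          let dhm := pvHM e.2.2.2.2.2
          let total := hm.1 * 60 + hm.2 + dhm.1 * 60 + dhm.2
          acc ++ [[("fecha", e.2.2.1), ("hora_inicio", e.2.2.2.1),
                   ("hora_fin", PySem.Str.join "" [pvFmt2 (PySem.Int.floordiv total 60), ":",
                                                   pvFmt2 (PySem.Int.mod total 60)])]]
        else acc)
      [])

-- ===== PRECONDITION & SPEC =====
def Spec_no_disponibilidad (personas_list : List Int) (out : Option (List (List (String × String)))) : Prop := out = no_disponibilidad_alt personas_list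
instance (personas_list : List Int) (out : Option (List (List (String × String)))) : Decidable (Spec_no_disponibilidad personas_list out) := by unfold Spec_no_disponibilidad; infer_instance

-- ===== CLAIM (what is proved, stated in full; the proofs are below) =====
def Claim_equal_no_disponibilidad : Prop := ∀ (personas_list : List Int), Dom_no_disponibilidad personas_list → Spec_no_disponibilidad personas_list (no_disponibilidad personas_list)

-- ===== LEMMAS AND PROOFS =====

-- Both results depend on personas_list only through emptiness and membership of 0, 1, 2.
set_option maxHeartbeats 2000000 in
theorem pv_key (l : List Int) (hne : ¬ l = [])
    (b0 b1 b2 : Bool)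
    (h0 : l.contains 0 = b0) (h1 : l.contains 1 = b1) (h2 : l.contains 2 = b2) :
    no_disponibilidad l = no_disponibilidad_alt l := by
  unfold no_disponibilidad no_disponibilidad_alt pvCalendarios pvEventos
  simp only [if_neg hne, List.foldl, List.any, h0, h1, h2]
  cases b0 <;> cases b1 <;> cases b2 <;> decide

-- ===== VERDICT (by name: the statement is the Claim_ definition above) =====
set_option maxHeartbeats 2000000 in
theorem no_disponibilidad_spec : Claim_equal_no_disponibilidad := by
  intro l _
  unfold Spec_no_disponibilidad
  by_cases hne : l = []
  · subst hne; decide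
  · exact pv_key l hne _ _ _ rfl rfl rfl
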